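-- pv_equiv track=rewrite | github.com/SirOlash/PythonClass | classWork/morningtask.py | upper_first
-- ===== SOURCE A (Python) =====
-- def upper_first(string):
--     upper_string = ""
--     lower_string = ""
--     for char in string:
--         if char.isupper():
--             upper_string += char
--         else:
--             lower_string += char
--     return upper_string + lower_string
-- ===== SOURCE B (Python) =====
-- def upper_first(string):
--     return "".join(sorted(string, key=lambda c: not c.isupper()))
-- ===== Notes on version B (the rewrite author's own statement) =====
-- stated objective: idiomatic
-- what changed: Replaced the two-accumulator partition loop with a single stable sort on a boolean key (uppercase first), joined back into a string.
import Mathlib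
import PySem

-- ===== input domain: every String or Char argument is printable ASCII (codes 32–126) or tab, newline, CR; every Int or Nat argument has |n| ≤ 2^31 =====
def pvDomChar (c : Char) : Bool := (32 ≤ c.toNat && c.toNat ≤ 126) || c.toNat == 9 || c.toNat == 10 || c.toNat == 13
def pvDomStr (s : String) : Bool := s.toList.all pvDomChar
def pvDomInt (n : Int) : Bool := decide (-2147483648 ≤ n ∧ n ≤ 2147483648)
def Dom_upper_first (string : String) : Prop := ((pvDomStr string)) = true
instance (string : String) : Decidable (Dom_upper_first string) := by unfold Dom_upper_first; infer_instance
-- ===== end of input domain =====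

-- B replaces A's two-accumulator partition loop by one stable sort on a boolean key (idiomatic one-liner).

-- ===== PORT A =====
-- A: two string accumulators built char by char, then concatenated.
def upper_first (string : String) : String :=
  let r := string.toList.foldl
    (fun (acc : List Char × List Char) c =>
      if PySem.Chars.isupper c then (acc.1 ++ [c], acc.2) else (acc.1, acc.2 ++ [c]))
    ([], [])
  String.ofList (r.1 ++ r.2)

-- ===== PORT B =====
-- B's sort key: Python's 'not c.isupper()' — the bool False/True compares as 0/1.
def pvKey (c : Char) : Int := if PySem.Chars.isupper c then 0 else 1

-- B: "".join(sorted(string, key=lambda c: not c.isupper()))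
def upper_first_alt (string : String) : String :=
  String.ofList (PySem.List.sorted string.toList pvKey false)

-- ===== PRECONDITION & SPEC =====
def Spec_upper_first (string : String) (out : String) : Prop := out = upper_first_alt string
instance (string : String) (out : String) : Decidable (Spec_upper_first string out) := by unfold Spec_upper_first; infer_instance

-- ===== CLAIM (what is proved, stated in full; the proofs are below) =====
def Claim_equal_upper_first : Prop := ∀ (string : String), Dom_upper_first string → Spec_upper_first string (upper_first string)

-- ===== LEMMAS AND PROOFS =====

-- inserting an uppercase char into (uppers ++ others) appends it to the uppers block
theorem pv_insertBy_upper (x : Char) (us ls : List Char)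
    (hx : PySem.Chars.isupper x = true)
    (hus : ∀ c ∈ us, PySem.Chars.isupper c = true)
    (hls : ∀ c ∈ ls, PySem.Chars.isupper c = false) :
    PySem.List.insertBy (fun a b => decide (pvKey a < pvKey b)) x (us ++ ls)
      = (us ++ [x]) ++ ls := by
  induction us with
  | nil =>
    cases ls with
    | nil => simp [PySem.List.insertBy]
    | cons y ys =>
      have hy := hls y (by simp)
      simp [PySem.List.insertBy, pvKey, hx, hy]
  | cons u us ih =>
    have hu := hus u (by simp)
    have ih' := ih (fun c hc => hus c (by simp [hc]))
    simp [PySem.List.insertBy, pvKey, hx, hu] at ih' ⊢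
    simpa [pvKey, hx, hu] using ih'

-- inserting a non-uppercase char appends it at the very end
theorem pv_insertBy_lower (x : Char) (ys : List Char)
    (hx : PySem.Chars.isupper x = false) :
    PySem.List.insertBy (fun a b => decide (pvKey a < pvKey b)) x ys = ys ++ [x] := by
  induction ys with
  | nil => simp [PySem.List.insertBy]
  | cons y t ih =>
    have h : ¬ pvKey x < pvKey y := by
      cases hy : PySem.Chars.isupper y <;> simp [pvKey, hx, hy]
    simp [PySem.List.insertBy, h, ih]

-- the insertion-sort fold keeps the (uppers ++ others) partition invariant
theorem pv_fold_invariant (cs us ls : List Char)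
    (hus : ∀ c ∈ us, PySem.Chars.isupper c = true)
    (hls : ∀ c ∈ ls, PySem.Chars.isupper c = false) :
    cs.foldl (fun acc x => PySem.List.insertBy (fun a b => decide (pvKey a < pvKey b)) x acc)
        (us ++ ls)
      = (us ++ cs.filter (fun c => PySem.Chars.isupper c))
          ++ (ls ++ cs.filter (fun c => !PySem.Chars.isupper c)) := by
  induction cs generalizing us ls with
  | nil => simp
  | cons c cs ih =>
    rw [List.foldl_cons]
    by_cases hc : PySem.Chars.isupper c = true
    · have hus' : ∀ d ∈ us ++ [c], PySem.Chars.isupper d = true := by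
        intro d hd
        rcases List.mem_append.1 hd with h | h
        · exact hus d h
        · simp at h; simpa [h] using hc
      rw [pv_insertBy_upper c us ls hc hus hls, ih (us ++ [c]) ls hus' hls]
      simp [hc]
    · have hc' : PySem.Chars.isupper c = false := by simpa using hc
      have hls' : ∀ d ∈ ls ++ [c], PySem.Chars.isupper d = false := by
        intro d hd
        rcases List.mem_append.1 hd with h | h
        · exact hls d h
        · simp at h; simpa [h] using hc'
      rw [pv_insertBy_lower c (us ++ ls) hc']
      rw [List.append_assoc, ih us (ls ++ [c]) hus hls']
      simp [hc']

-- A's loop computes the same two filters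
theorem pv_a_loop (cs u l : List Char) :
    cs.foldl (fun (acc : List Char × List Char) c =>
        if PySem.Chars.isupper c then (acc.1 ++ [c], acc.2) else (acc.1, acc.2 ++ [c]))
      (u, l)
      = (u ++ cs.filter (fun c => PySem.Chars.isupper c),
         l ++ cs.filter (fun c => !PySem.Chars.isupper c)) := by
  induction cs generalizing u l with
  | nil => simp
  | cons c cs ih =>
    by_cases hc : PySem.Chars.isupper c = true
    · simp [hc, ih]
    · have hc' : PySem.Chars.isupper c = false := by simpa using hc
      simp [hc', ih]

-- ===== VERDICT (by name: the statement is the Claim_ definition above) =====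
theorem upper_first_spec : Claim_equal_upper_first := by
  intro s _
  show upper_first s = upper_first_alt s
  unfold upper_first upper_first_alt
  rw [PySem.List.sorted_eq_foldl_insertBy]
  have hB := pv_fold_invariant s.toList [] [] (by simp) (by simp)
  have hA := pv_a_loop s.toList [] []
  simp only [List.nil_append] at hB hA
  simp only [hA, hB]
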